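-- pv_equiv track=rewrite | github.com/dkb1982/myTaxPal | src/tax_estimator/api/errors.py | _map_pydantic_error_type
-- ===== SOURCE A (Python) =====
-- def _map_pydantic_error_type(error_type: str) -> str:
--     """Map Pydantic error types to our error codes."""
--     mappings = {
--         "missing": "MISSING_FIELD",
--         "value_error": "INVALID_VALUE",
--         "type_error": "INVALID_TYPE",
--         "string_type": "INVALID_TYPE",
--         "int_type": "INVALID_TYPE",
--         "float_type": "INVALID_TYPE",
--         "bool_type": "INVALID_TYPE",
--         "list_type": "INVALID_TYPE",
--         "dict_type": "INVALID_TYPE",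
--         "greater_than": "VALUE_OUT_OF_RANGE",
--         "greater_than_equal": "VALUE_OUT_OF_RANGE",
--         "less_than": "VALUE_OUT_OF_RANGE",
--         "less_than_equal": "VALUE_OUT_OF_RANGE",
--         "string_pattern_mismatch": "INVALID_VALUE",
--         "enum": "INVALID_VALUE",
--         "date_from_datetime_parsing": "INVALID_DATE",
--         "date_parsing": "INVALID_DATE",
--         "datetime_parsing": "INVALID_DATE",
--     }
--
--     # Check for exact match or prefix match
--     for key, code in mappings.items():
--         if error_type == key or error_type.startswith(key + "."):
--             return code
--
--     return "INVALID_VALUE"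
-- ===== SOURCE B (Python) =====
-- # Inverted table: a handful of frozensets grouped BY CODE, plus the observation
-- # that every key mapping to "INVALID_VALUE" coincides with the default, so
-- # those keys need not be listed at all.  The lookup key is the segment before
-- # the first dot (partition), which folds A's exact-or-dotted-prefix test into
-- # plain set membership.
-- _TYPE_KEYS = frozenset({"type_error", "string_type", "int_type", "float_type",
--                         "bool_type", "list_type", "dict_type"})
-- _RANGE_KEYS = frozenset({"greater_than", "greater_than_equal",
--                          "less_than", "less_than_equal"})
-- _DATE_KEYS = frozenset({"date_from_datetime_parsing", "date_parsing",
--                         "datetime_parsing"})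
--
--
-- def _map_pydantic_error_type(error_type: str) -> str:
--     """Map Pydantic error types to our error codes."""
--     prefix = error_type.partition(".")[0]
--     if prefix == "missing":
--         return "MISSING_FIELD"
--     if prefix in _TYPE_KEYS:
--         return "INVALID_TYPE"
--     if prefix in _RANGE_KEYS:
--         return "VALUE_OUT_OF_RANGE"
--     if prefix in _DATE_KEYS:
--         return "INVALID_DATE"
--     return "INVALID_VALUE"
-- ===== Notes on version B (the rewrite author's own statement) =====
-- stated objective: simpler
-- what changed: B inverts the table: it derives the lookup key once (segment before the first dot via partition) and classifies it by membership in three code-grouped sets, dropping the keys whose code equals the default; A's loop over 18 (key,code) pairs with an exact-or-dotted-prefix test per key disappears.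
import Mathlib
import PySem

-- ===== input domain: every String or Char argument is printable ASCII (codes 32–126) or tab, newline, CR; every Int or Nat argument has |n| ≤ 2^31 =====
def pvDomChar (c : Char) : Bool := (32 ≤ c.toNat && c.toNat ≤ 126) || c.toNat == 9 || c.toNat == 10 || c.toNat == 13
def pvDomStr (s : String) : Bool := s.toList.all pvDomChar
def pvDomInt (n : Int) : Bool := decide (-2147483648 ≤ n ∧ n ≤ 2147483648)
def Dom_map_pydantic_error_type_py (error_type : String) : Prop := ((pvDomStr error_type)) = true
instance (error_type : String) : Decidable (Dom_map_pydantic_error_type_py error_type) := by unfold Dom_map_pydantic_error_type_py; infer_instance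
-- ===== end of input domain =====

-- B inverts the table: the lookup key is derived once (segment before the first dot) and
-- classified by membership in three code-grouped sets; keys whose code is the default are
-- dropped.  A's loop over 18 (key, code) pairs with a per-key prefix test disappears: simpler.

-- ===== PORT A =====
-- the dict literal, in insertion order (association list per the type convention)
def aMappings : List (String × String) :=
  [("missing", "MISSING_FIELD"),
   ("value_error", "INVALID_VALUE"),
   ("type_error", "INVALID_TYPE"),
   ("string_type", "INVALID_TYPE"),
   ("int_type", "INVALID_TYPE"),
   ("float_type", "INVALID_TYPE"),
   ("bool_type", "INVALID_TYPE"),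
   ("list_type", "INVALID_TYPE"),
   ("dict_type", "INVALID_TYPE"),
   ("greater_than", "VALUE_OUT_OF_RANGE"),
   ("greater_than_equal", "VALUE_OUT_OF_RANGE"),
   ("less_than", "VALUE_OUT_OF_RANGE"),
   ("less_than_equal", "VALUE_OUT_OF_RANGE"),
   ("string_pattern_mismatch", "INVALID_VALUE"),
   ("enum", "INVALID_VALUE"),
   ("date_from_datetime_parsing", "INVALID_DATE"),
   ("date_parsing", "INVALID_DATE"),
   ("datetime_parsing", "INVALID_DATE")]

-- the for-loop over mappings.items(): first (key, code) with
-- error_type == key or error_type.startswith(key + "."), else "INVALID_VALUE"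
def aLoop (error_type : String) : List (String × String) → String
  | [] => "INVALID_VALUE"
  | (key, code) :: rest =>
      if error_type == key || PySem.Str.startswith error_type (key ++ ".") then code
      else aLoop error_type rest

def map_pydantic_error_type_py (error_type : String) : String :=
  aLoop error_type aMappings

-- ===== PORT B =====
-- the three code-grouped sets (finite sets of distinct strings per the type convention)
def bTypeKeys : List String :=
  ["type_error", "string_type", "int_type", "float_type", "bool_type", "list_type", "dict_type"]
def bRangeKeys : List String :=
  ["greater_than", "greater_than_equal", "less_than", "less_than_equal"]
def bDateKeys : List String :=
  ["date_from_datetime_parsing", "date_parsing", "datetime_parsing"]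

def map_pydantic_error_type_py_alt (error_type : String) : String :=
  -- error_type.partition(".")[0]: the characters before the first '.'
  -- (exact: partition's first component is the text before the first separator,
  -- the whole string when the separator is absent)
  let pre := String.ofList (error_type.toList.takeWhile (· != '.'))
  if pre == "missing" then "MISSING_FIELD"
  else if bTypeKeys.contains pre then "INVALID_TYPE"
  else if bRangeKeys.contains pre then "VALUE_OUT_OF_RANGE"
  else if bDateKeys.contains pre then "INVALID_DATE"
  else "INVALID_VALUE"

-- ===== PRECONDITION & SPEC =====
def Spec_map_pydantic_error_type_py (error_type : String) (out : String) : Prop := out = map_pydantic_error_type_py_alt error_type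
instance (error_type : String) (out : String) : Decidable (Spec_map_pydantic_error_type_py error_type out) := by unfold Spec_map_pydantic_error_type_py; infer_instance

-- ===== CLAIM (what is proved, stated in full; the proofs are below) =====
def Claim_equal_map_pydantic_error_type_py : Prop := ∀ (error_type : String), Dom_map_pydantic_error_type_py error_type → Spec_map_pydantic_error_type_py error_type (map_pydantic_error_type_py error_type)

-- ===== LEMMAS AND PROOFS =====

-- chars before the first '.' equal k  ↔  the string IS k or starts with k followed by '.'
-- (for dot-free k; this is why A's per-key test collapses to a test on the prefix)
lemma takeWhile_eq_iff (l k : List Char) (hk : '.' ∉ k) :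
    l.takeWhile (· != '.') = k ↔ (l = k ∨ (k ++ ['.']) <+: l) := by
  constructor
  · intro h
    have hsplit : l = k ++ l.dropWhile (· != '.') := by
      conv_lhs => rw [← List.takeWhile_append_dropWhile (p := (· != '.')) (l := l)]
      rw [h]
    cases hd : l.dropWhile (· != '.') with
    | nil => left; simpa [hd] using hsplit
    | cons c t =>
      right
      have hc : ¬ ((· != '.') c = true) := by
        have hh := List.head?_dropWhile_not (p := (· != '.')) (l := l)
        rw [hd] at hh; simp at hh
        simp [hh]
      have hc' : c = '.' := by simpa using hc
      refine ⟨t, ?_⟩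
      rw [hsplit, hd, hc']; simp
  · intro h
    rcases h with h | ⟨t, ht⟩
    · subst h
      apply List.takeWhile_eq_self_iff.mpr
      intro c hc; simp; rintro rfl; exact hk hc
    · rw [← ht, List.append_assoc]
      rw [List.takeWhile_append_of_pos (by intro c hc; simp; rintro rfl; exact hk hc)]
      simp

-- A's per-key condition, in Bool form, equals "prefix-before-first-dot == key"
lemma cond_eq (s k : String) (hk : '.' ∉ k.toList) :
    (s == k || PySem.Str.startswith s (k ++ ".")) =
      (String.ofList (s.toList.takeWhile (· != '.')) == k) := by
  have h1 : (s == k) = true ↔ s.toList = k.toList := by simp [String.ext_iff]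
  have h2 : PySem.Str.startswith s (k ++ ".") = true ↔ (k.toList ++ ['.']) <+: s.toList := by
    rw [show PySem.Str.startswith s (k ++ ".") =
          PySem.Chars.startswith s.toList (k.toList ++ ['.']) from by simp [PySem.Str.startswith]]
    exact PySem.Chars.startswith_iff _ _
  have h3 : (String.ofList (s.toList.takeWhile (· != '.')) == k) = true ↔
      s.toList.takeWhile (· != '.') = k.toList := by simp [String.ext_iff]
  rw [Bool.eq_iff_iff]
  simp only [Bool.or_eq_true]
  rw [h1, h2, h3, takeWhile_eq_iff _ _ hk]

-- proof-side helper: first-match lookup of a key in the pair table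
def pGet (key : String) : List (String × String) → String
  | [] => "INVALID_VALUE"
  | (k, v) :: rest => if key == k then v else pGet key rest

-- the whole loop equals one first-match lookup of the prefix, for any dot-free key table
lemma loop_eq_get (s : String) (l : List (String × String))
    (hl : ∀ p ∈ l, '.' ∉ p.1.toList) :
    aLoop s l = pGet (String.ofList (s.toList.takeWhile (· != '.'))) l := by
  induction l with
  | nil => rfl
  | cons p rest ih =>
    rcases p with ⟨k, v⟩
    have hk : '.' ∉ k.toList := hl (k, v) (List.mem_cons_self)
    simp only [aLoop, pGet, cond_eq s k hk]
    rw [ih (fun q hq => hl q (List.mem_cons_of_mem _ hq))]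

-- lookup in A's table agrees with B's code-grouped classification, for EVERY key string
lemma get_eq_classify (p : String) :
    pGet p aMappings =
      (if p == "missing" then "MISSING_FIELD"
       else if bTypeKeys.contains p then "INVALID_TYPE"
       else if bRangeKeys.contains p then "VALUE_OUT_OF_RANGE"
       else if bDateKeys.contains p then "INVALID_DATE"
       else "INVALID_VALUE") := by
  by_cases h : p ∈ ["missing", "value_error", "type_error", "string_type", "int_type",
      "float_type", "bool_type", "list_type", "dict_type", "greater_than",
      "greater_than_equal", "less_than", "less_than_equal", "string_pattern_mismatch",
      "enum", "date_from_datetime_parsing", "date_parsing", "datetime_parsing"]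
  · -- p is one of the 18 keys: substitute and compute both sides
    fin_cases h <;> rfl
  · -- p matches no key: every equality test is false and both sides give the default
    simp only [List.mem_cons, List.not_mem_nil, or_false, not_or] at h
    obtain ⟨h1, h2, h3, h4, h5, h6, h7, h8, h9, h10, h11, h12, h13, h14, h15, h16, h17, h18⟩ := h
    simp [pGet, aMappings, bTypeKeys, bRangeKeys, bDateKeys,
      h1, h2, h3, h4, h5, h6, h7, h8, h9, h10, h11, h12, h13, h14, h15, h16, h17, h18]

-- ===== VERDICT (by name: the statement is the Claim_ definition above) =====
theorem map_pydantic_error_type_py_spec : Claim_equal_map_pydantic_error_type_py := by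
  intro s _
  unfold Spec_map_pydantic_error_type_py map_pydantic_error_type_py map_pydantic_error_type_py_alt
  rw [loop_eq_get s aMappings (by decide), get_eq_classify]
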